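-- pv_equiv track=rewrite | github.com/fentender/sutan-game | src/core/id_remapper.py | allocate_new_ids
-- ===== SOURCE A (Python) =====
-- ID_ALLOC_START: dict[str, int | None] = {
--     "cards": 2900000,
--     "tag_id": 3900000,
--     "tag_code": None,         # tag code 通过加后缀生成
--     "rite": 5090000,
--     "event": 5390000,
--     "over": 900,
--     "loot": 6900000,
--     "rite_template": 8090000,
--     "rite_template_mappings": 8091000,
-- }
--
-- def _next_available_id(start: int, used: set[str]) -> int:
--     """从 start 开始找到下一个未使用的 ID"""
--     candidate = start
--     while str(candidate) in used:
--         candidate += 1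
--     return candidate
--
-- def allocate_new_ids(
--     conflicts: dict[str, dict[str, list[int]]],
--     all_used: dict[str, set[str]],
--     mod_count: int,
-- ) -> dict[tuple[int, str, str], str]:
--     """
--     为冲突 ID 分配新值。
--     冲突中优先级最高的 mod（索引最大）保留原 ID，其余重分配。
--     返回 {(mod_index, entity_type, old_id): new_id}
--     """
--     remap: dict[tuple[int, str, str], str] = {}
--     # 跟踪已分配的新 ID，避免分配重复
--     newly_allocated: dict[str, set[str]] = {k: set() for k in all_used}
--
--     for entity_type, id_conflicts in conflicts.items():
--         # 确定分配类型 key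
--         alloc_key = entity_type
--         if alloc_key == "tag_code":
--             continue  # tag code 用后缀方式处理，不走数字分配
--
--         start_val = ID_ALLOC_START.get(alloc_key, 9000000)
--         start = start_val if start_val is not None else 9000000
--
--         for old_id, mod_indices in id_conflicts.items():
--             # 优先级最高的 mod（索引最大）保留原 ID
--             keeper = max(mod_indices)
--             for mod_idx in sorted(mod_indices):
--                 if mod_idx == keeper:
--                     continue
--                 # 分配新 ID
--                 combined_used = all_used.get(alloc_key, set()) | newly_allocated.get(alloc_key, set())
--                 new_id_int = _next_available_id(start, combined_used)
--                 new_id = str(new_id_int)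
--                 remap[(mod_idx, entity_type, old_id)] = new_id
--                 newly_allocated.setdefault(alloc_key, set()).add(new_id)
--                 start = new_id_int + 1  # 下次从更大的值开始
--
--     # tag code 冲突：通过加后缀解决
--     if "tag_code" in conflicts:
--         for old_code, mod_indices in conflicts["tag_code"].items():
--             keeper = max(mod_indices)
--             suffix_counter = 1
--             for mod_idx in sorted(mod_indices):
--                 if mod_idx == keeper:
--                     continue
--                 new_code = f"{old_code}_{suffix_counter}"
--                 combined_used = all_used.get("tag", set()) | newly_allocated.get("tag", set())
--                 while new_code in combined_used:
--                     suffix_counter += 1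
--                     new_code = f"{old_code}_{suffix_counter}"
--                 remap[(mod_idx, "tag_code", old_code)] = new_code
--                 newly_allocated.setdefault("tag", set()).add(new_code)
--                 suffix_counter += 1
--
--     return remap
-- ===== SOURCE B (Python) =====
-- from itertools import count, islice
--
-- ID_ALLOC_START: dict[str, int | None] = {
--     "cards": 2900000,
--     "tag_id": 3900000,
--     "tag_code": None,
--     "rite": 5090000,
--     "event": 5390000,
--     "over": 900,
--     "loot": 6900000,
--     "rite_template": 8090000,
--     "rite_template_mappings": 8091000,
-- }
--
--
-- def allocate_new_ids(
--     conflicts: dict[str, dict[str, list[int]]],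
--     all_used: dict[str, set[str]],
--     mod_count: int,
-- ) -> dict[tuple[int, str, str], str]:
--     # Staged batch allocation: per entity type, first collect the list of
--     # (mod_index, old_id) slots that need a fresh ID, then draw that many free
--     # IDs in one filtered scan over the counting stream, and zip them together.
--     # The used set is never updated: a freshly drawn ID can never collide with a
--     # later candidate (the numeric candidates are strictly increasing, and a
--     # suffixed tag code determines its old code and suffix uniquely).
--     remap: dict[tuple[int, str, str], str] = {}
--
--     for entity_type, id_conflicts in conflicts.items():
--         if entity_type == "tag_code":
--             continue
--         start_val = ID_ALLOC_START.get(entity_type, 9000000)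
--         start = 9000000 if start_val is None else start_val
--         used = all_used.get(entity_type, set())
--         slots: list[tuple[int, str]] = []
--         for old_id, mod_indices in id_conflicts.items():
--             keeper = max(mod_indices)
--             slots.extend((m, old_id) for m in sorted(mod_indices) if m != keeper)
--         fresh = filter(lambda c: str(c) not in used, count(start))
--         for (mod_idx, old_id), new_id in zip(slots, islice(fresh, len(slots))):
--             remap[(mod_idx, entity_type, old_id)] = str(new_id)
--
--     if "tag_code" in conflicts:
--         used = all_used.get("tag", set())
--         for old_code, mod_indices in conflicts["tag_code"].items():
--             keeper = max(mod_indices)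
--             losers = [m for m in sorted(mod_indices) if m != keeper]
--             fresh = filter(lambda c: c not in used,
--                            (f"{old_code}_{k}" for k in count(1)))
--             for mod_idx, new_code in zip(losers, islice(fresh, len(losers))):
--                 remap[(mod_idx, "tag_code", old_code)] = new_code
--
--     return remap
-- ===== Notes on version B (the rewrite author's own statement) =====
-- stated objective: alternative
-- what changed: A allocates one ID at a time, rebuilding the union of the frozen used set and the newly-allocated set before every single allocation; B is staged: per entity type it first collects all (mod_index, old_id) slots needing an ID, then draws that many free IDs in one filtered scan of the frozen used set only (a freshly drawn ID can never collide with a later candidate), and zips slots with IDs; tag codes are handled the same way per old code.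
import Mathlib
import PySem

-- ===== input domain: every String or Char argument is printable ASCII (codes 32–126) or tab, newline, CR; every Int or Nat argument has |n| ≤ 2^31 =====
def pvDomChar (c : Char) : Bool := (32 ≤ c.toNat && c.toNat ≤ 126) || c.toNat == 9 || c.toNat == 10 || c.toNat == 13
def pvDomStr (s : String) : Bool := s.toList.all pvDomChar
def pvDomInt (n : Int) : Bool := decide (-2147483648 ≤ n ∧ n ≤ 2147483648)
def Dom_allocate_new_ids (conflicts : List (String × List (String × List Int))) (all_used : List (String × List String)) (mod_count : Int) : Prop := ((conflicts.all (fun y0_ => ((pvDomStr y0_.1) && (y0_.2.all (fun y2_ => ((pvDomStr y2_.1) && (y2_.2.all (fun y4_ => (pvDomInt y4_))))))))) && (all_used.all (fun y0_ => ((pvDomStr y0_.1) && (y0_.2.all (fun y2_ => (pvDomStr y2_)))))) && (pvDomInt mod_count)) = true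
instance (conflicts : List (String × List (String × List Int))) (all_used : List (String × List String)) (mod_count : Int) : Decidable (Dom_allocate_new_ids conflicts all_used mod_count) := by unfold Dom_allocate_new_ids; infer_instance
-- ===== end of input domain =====

-- B replaces A's allocate-one-at-a-time loop (which rebuilds the union of the frozen used set
-- and the newly-allocated set before every single allocation) by a staged batch allocation:
-- per entity type it first collects all (mod_index, old_id) slots, then draws that many free IDs
-- in one filtered scan of the frozen used set only, and zips slots with IDs (objective: alternative).

-- ===== PORT A =====
-- module constant ID_ALLOC_START (values int | None = Option Int)
def pvIdAllocStart : PySem.Dict String (Option Int) :=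
  PySem.Dict.mk [("cards", some 2900000), ("tag_id", some 3900000), ("tag_code", none),
    ("rite", some 5090000), ("event", some 5390000), ("over", some 900), ("loot", some 6900000),
    ("rite_template", some 8090000), ("rite_template_mappings", some 8091000)]

-- start_val = ID_ALLOC_START.get(k, 9000000); start = start_val if start_val is not None else 9000000
def pvStartFor (et : String) : Int :=
  (pvIdAllocStart.getD et (some 9000000)).getD 9000000

-- f"{old_code}_{suffix_counter}"  (shared formatting helper of both ports)
def pvCode (old : String) (k : Int) : String :=
  String.ofList (old.toList ++ '_' :: PySem.Int.toChars k)

-- _next_available_id: the while loop, with fuel |used|+1 (always sufficient: the fuel+1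
-- candidate strings are distinct, so one of them is free; exact port of the loop)
def pvNextAvailable (fuel : Nat) (candidate : Int) (used : PySem.Set String) : Int :=
  match fuel with
  | 0 => candidate
  | f + 1 =>
    if used.contains (PySem.Int.toStr candidate) then pvNextAvailable f (candidate + 1) used
    else candidate

-- A's tag-code while loop: new_code = f"{old}_{suffix}"; while in combined: suffix += 1, recompute
def pvTagScan (fuel : Nat) (old : String) (suffix : Int) (used : PySem.Set String) : String × Int :=
  match fuel with
  | 0 => (pvCode old suffix, suffix)
  | f + 1 =>
    if used.contains (pvCode old suffix) then pvTagScan f old (suffix + 1) used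
    else (pvCode old suffix, suffix)

-- A, innermost loop body: state (remap, newly_allocated, start)
def pvStepA (au : List (String × List String)) (et old : String) (keeper : Int)
    (st : PySem.Dict (Int × String × String) String × PySem.Dict String (PySem.Set String) × Int)
    (mod_idx : Int) :
    PySem.Dict (Int × String × String) String × PySem.Dict String (PySem.Set String) × Int :=
  if mod_idx == keeper then st
  else
    let combined : PySem.Set String :=
      PySem.Set.union ((PySem.Dict.mk au).getD et []) (st.2.1.getD et [])
    let newIdInt := pvNextAvailable (combined.length + 1) st.2.2 combined
    let newId := PySem.Int.toStr newIdInt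
    (st.1.insert (mod_idx, et, old) newId,
     st.2.1.insert et ((st.2.1.getD et []).add newId),
     newIdInt + 1)

-- A, loop over id_conflicts.items()
def pvConfStepA (au : List (String × List String)) (et : String)
    (st : PySem.Dict (Int × String × String) String × PySem.Dict String (PySem.Set String) × Int)
    (p : String × List Int) :
    PySem.Dict (Int × String × String) String × PySem.Dict String (PySem.Set String) × Int :=
  let keeper := (PySem.List.max? p.2 (fun x => x)).getD 0
  (PySem.List.sorted p.2 (fun x => x) false).foldl (pvStepA au et p.1 keeper) st

-- A, loop over conflicts.items()
def pvEntStepA (au : List (String × List String))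
    (st : PySem.Dict (Int × String × String) String × PySem.Dict String (PySem.Set String))
    (e : String × List (String × List Int)) :
    PySem.Dict (Int × String × String) String × PySem.Dict String (PySem.Set String) :=
  if e.1 == "tag_code" then st
  else
    let t := e.2.foldl (pvConfStepA au e.1) (st.1, st.2, pvStartFor e.1)
    (t.1, t.2.1)

-- A, tag-code innermost loop body: state (remap, newly_allocated, suffix_counter)
def pvTagStepA (au : List (String × List String)) (old : String) (keeper : Int)
    (st : PySem.Dict (Int × String × String) String × PySem.Dict String (PySem.Set String) × Int)
    (mod_idx : Int) :
    PySem.Dict (Int × String × String) String × PySem.Dict String (PySem.Set String) × Int :=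
  if mod_idx == keeper then st
  else
    let combined : PySem.Set String :=
      PySem.Set.union ((PySem.Dict.mk au).getD "tag" []) (st.2.1.getD "tag" [])
    let cs := pvTagScan (combined.length + 1) old st.2.2 combined
    (st.1.insert (mod_idx, "tag_code", old) cs.1,
     st.2.1.insert "tag" ((st.2.1.getD "tag" []).add cs.1),
     cs.2 + 1)

-- A, loop over conflicts["tag_code"].items() (suffix_counter restarts at 1 per old_code)
def pvTagConfStepA (au : List (String × List String))
    (st : PySem.Dict (Int × String × String) String × PySem.Dict String (PySem.Set String))
    (p : String × List Int) :
    PySem.Dict (Int × String × String) String × PySem.Dict String (PySem.Set String) :=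
  let keeper := (PySem.List.max? p.2 (fun x => x)).getD 0
  let t := (PySem.List.sorted p.2 (fun x => x) false).foldl (pvTagStepA au p.1 keeper) (st.1, st.2, 1)
  (t.1, t.2.1)

def allocate_new_ids (conflicts : List (String × List (String × List Int))) (all_used : List (String × List String)) (mod_count : Int) : List (Int × String × String × String) :=
  -- newly_allocated = {k: set() for k in all_used}
  let newly0 : PySem.Dict String (PySem.Set String) :=
    PySem.Dict.mk (all_used.map (fun kv => (kv.1, ([] : PySem.Set String))))
  let st1 := conflicts.foldl (pvEntStepA all_used) (PySem.Dict.empty, newly0)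
  let st2 :=
    match (PySem.Dict.mk conflicts).get? "tag_code" with
    | none => st1
    | some idc => idc.foldl (pvTagConfStepA all_used) st1
  st2.1.items.map (fun q => (q.1.1, q.1.2.1, q.1.2.2, q.2))

-- ===== PORT B =====
-- B: filter(lambda c: str(c) not in used, count(start)) consumed once: the scan for the next
-- free candidate, fuel |used|+1 (sufficient: the fuel+1 candidate strings are distinct)
def pvScanId (fuel : Nat) (start : Int) (u : PySem.Set String) : Int :=
  match fuel with
  | 0 => start
  | f + 1 =>
    if u.contains (PySem.Int.toStr start) then pvScanId f (start + 1) u else start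

-- B: islice(fresh, n) — the n first free IDs drawn from the filtered counting stream
def pvFreshIds (u : PySem.Set String) : Int → Nat → List Int
  | _, 0 => []
  | start, n + 1 =>
    let id := pvScanId (u.length + 1) start u
    id :: pvFreshIds u (id + 1) n

-- B: the slots list built per entity type (loop + extend of a comprehension)
def pvSlots (idc : List (String × List Int)) : List (Int × String) :=
  idc.flatMap (fun p =>
    let keeper := (PySem.List.max? p.2 (fun x => x)).getD 0
    ((PySem.List.sorted p.2 (fun x => x) false).filter (fun m => !(m == keeper))).map
      (fun m => (m, p.1)))

-- B: one entity type of the main loop: collect slots, draw IDs, zip and insert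
def pvEntB (au : List (String × List String))
    (remap : PySem.Dict (Int × String × String) String)
    (e : String × List (String × List Int)) : PySem.Dict (Int × String × String) String :=
  if e.1 == "tag_code" then remap
  else
    let used : PySem.Set String := (PySem.Dict.mk au).getD e.1 []
    let slots := pvSlots e.2
    let ids := pvFreshIds used (pvStartFor e.1) slots.length
    (slots.zip ids).foldl (fun r q => r.insert (q.1.1, e.1, q.1.2) (PySem.Int.toStr q.2)) remap

-- B: the filtered code stream: scan for the next free suffix (fuel |used|+1, sufficient)
def pvScanCode (fuel : Nat) (old : String) (k : Int) (u : PySem.Set String) : Int :=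
  match fuel with
  | 0 => k
  | f + 1 =>
    if u.contains (pvCode old k) then pvScanCode f old (k + 1) u else k

-- B: islice over the filtered code generator
def pvFreshCodes (u : PySem.Set String) (old : String) : Int → Nat → List String
  | _, 0 => []
  | k, n + 1 =>
    let k' := pvScanCode (u.length + 1) old k u
    pvCode old k' :: pvFreshCodes u old (k' + 1) n

-- B: one old_code of the tag-code loop: losers, free codes, zip and insert
def pvTagB (au : List (String × List String))
    (remap : PySem.Dict (Int × String × String) String)
    (p : String × List Int) : PySem.Dict (Int × String × String) String :=
  let keeper := (PySem.List.max? p.2 (fun x => x)).getD 0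
  let losers := (PySem.List.sorted p.2 (fun x => x) false).filter (fun m => !(m == keeper))
  let used : PySem.Set String := (PySem.Dict.mk au).getD "tag" []
  let codes := pvFreshCodes used p.1 1 losers.length
  (losers.zip codes).foldl (fun r q => r.insert (q.1, "tag_code", p.1) q.2) remap

def allocate_new_ids_alt (conflicts : List (String × List (String × List Int))) (all_used : List (String × List String)) (mod_count : Int) : List (Int × String × String × String) :=
  let r1 := conflicts.foldl (pvEntB all_used) PySem.Dict.empty
  let r2 :=
    match (PySem.Dict.mk conflicts).get? "tag_code" with
    | none => r1
    | some idc => idc.foldl (pvTagB all_used) r1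
  r2.items.map (fun q => (q.1.1, q.1.2.1, q.1.2.2, q.2))

-- ===== PRECONDITION & SPEC =====
-- Pre_ excludes (a) conflict entries with an empty mod-index list, on which Python A raises
-- ValueError from max([]); and (b) association lists with duplicate dict keys or duplicate
-- set elements, which cannot arise from the Python dict/set arguments they represent.
def Pre_allocate_new_ids (conflicts : List (String × List (String × List Int))) (all_used : List (String × List String)) (mod_count : Int) : Prop :=
  (conflicts.map Prod.fst).Nodup ∧
  (∀ e ∈ conflicts, (e.2.map Prod.fst).Nodup ∧ ∀ p ∈ e.2, p.2 ≠ []) ∧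
  (all_used.map Prod.fst).Nodup ∧
  (∀ kv ∈ all_used, kv.2.Nodup)
instance (conflicts : List (String × List (String × List Int))) (all_used : List (String × List String)) (mod_count : Int) : Decidable (Pre_allocate_new_ids conflicts all_used mod_count) := by unfold Pre_allocate_new_ids; infer_instance

def pvWitness_allocate_new_ids : (List (String × List (String × List Int))) × (List (String × List String)) × Int :=
  ([("cards", [("5", [0, 1])])], [("cards", ["2900000"])], 2)

def Spec_allocate_new_ids (conflicts : List (String × List (String × List Int))) (all_used : List (String × List String)) (mod_count : Int) (out : List (Int × String × String × String)) : Prop := out = allocate_new_ids_alt conflicts all_used mod_count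
instance (conflicts : List (String × List (String × List Int))) (all_used : List (String × List String)) (mod_count : Int) (out : List (Int × String × String × String)) : Decidable (Spec_allocate_new_ids conflicts all_used mod_count out) := by unfold Spec_allocate_new_ids; infer_instance

-- ===== CLAIM (what is proved, stated in full; the proofs are below) =====
def Claim_equal_allocate_new_ids : Prop := ∀ (conflicts : List (String × List (String × List Int))) (all_used : List (String × List String)) (mod_count : Int), Dom_allocate_new_ids conflicts all_used mod_count → Pre_allocate_new_ids conflicts all_used mod_count → Spec_allocate_new_ids conflicts all_used mod_count (allocate_new_ids conflicts all_used mod_count)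

-- ===== LEMMAS AND PROOFS =====

-- ---- string facts: str(n) is injective, contains no '_', and is all digits for n ≥ 0 ----

lemma pv_digitChar_inj {m n : Nat} (hm : m < 10) (hn : n < 10)
    (h : Nat.digitChar m = Nat.digitChar n) : m = n := by
  interval_cases m <;> interval_cases n <;> revert h <;> decide

lemma pv_toDigits10_inj (m : Nat) : ∀ n, Nat.toDigits 10 m = Nat.toDigits 10 n → m = n := by
  induction m using Nat.strong_induction_on with
  | _ m ih =>
    intro n h
    rw [Nat.toDigits_eq_if (by norm_num)] at h
    rw [Nat.toDigits_eq_if (b := 10) (n := n) (by norm_num)] at h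
    by_cases hm : m < 10 <;> by_cases hn : n < 10
    · rw [if_pos hm, if_pos hn] at h
      have : Nat.digitChar m = Nat.digitChar n := by simpa using h
      exact pv_digitChar_inj hm hn this
    · rw [if_pos hm, if_neg hn] at h
      have hl := congrArg List.length h
      have := @Nat.length_toDigits_pos 10 (n / 10)
      simp only [List.length_append, List.length_cons, List.length_nil] at hl
      omega
    · rw [if_neg hm, if_pos hn] at h
      have hl := congrArg List.length h
      have := @Nat.length_toDigits_pos 10 (m / 10)
      simp only [List.length_append, List.length_cons, List.length_nil] at hl
      omega
    · rw [if_neg hm, if_neg hn] at h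
      obtain ⟨h1, h2⟩ := List.append_inj' h rfl
      have e1 : m / 10 = n / 10 := ih (m / 10) (by omega) _ h1
      have e2 : m % 10 = n % 10 :=
        pv_digitChar_inj (Nat.mod_lt _ (by norm_num)) (Nat.mod_lt _ (by norm_num))
          (by simpa using h2)
      omega

lemma pv_toChars_inj {a b : Int} (h : PySem.Int.toChars a = PySem.Int.toChars b) : a = b := by
  unfold PySem.Int.toChars at h
  split_ifs at h with ha hb hb
  · have := pv_toDigits10_inj a.natAbs b.natAbs (by simpa using h)
    omega
  · exfalso
    have hm : '-' ∈ Nat.toDigits 10 b.toNat := h ▸ List.mem_cons_self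
    have := Nat.isDigit_of_mem_toDigits (b := 10) (by norm_num) (by norm_num) hm
    simp [Char.isDigit] at this
  · exfalso
    have hm : '-' ∈ Nat.toDigits 10 a.toNat := h ▸ List.mem_cons_self
    have := Nat.isDigit_of_mem_toDigits (b := 10) (by norm_num) (by norm_num) hm
    simp [Char.isDigit] at this
  · have := pv_toDigits10_inj a.toNat b.toNat h
    omega

lemma pv_toStr_inj {a b : Int} (h : PySem.Int.toStr a = PySem.Int.toStr b) : a = b := by
  apply pv_toChars_inj
  have := congrArg String.toList h
  simpa [PySem.Int.toStr, String.toList_ofList] using this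

lemma pv_underscore_not_mem_toChars (m : Int) : '_' ∉ PySem.Int.toChars m := by
  intro hm
  unfold PySem.Int.toChars at hm
  split_ifs at hm with h
  · rcases List.mem_cons.1 hm with h' | h'
    · exact absurd h' (by decide)
    · have := Nat.isDigit_of_mem_toDigits (b := 10) (by norm_num) (by norm_num) h'
      simp [Char.isDigit] at this
  · have := Nat.isDigit_of_mem_toDigits (b := 10) (by norm_num) (by norm_num) hm
    simp [Char.isDigit] at this

lemma pv_toChars_digits {m : Int} (h : 0 ≤ m) : ∀ c ∈ PySem.Int.toChars m, c.isDigit := by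
  intro c hc
  unfold PySem.Int.toChars at hc
  rw [if_neg (by omega)] at hc
  exact Nat.isDigit_of_mem_toDigits (b := 10) (by norm_num) (by norm_num) hc

-- ---- facts about the code f"{old}_{k}" ----

lemma pv_code_toList (old : String) (k : Int) :
    (pvCode old k).toList = old.toList ++ '_' :: PySem.Int.toChars k := by
  simp [pvCode, String.toList_ofList]

lemma pv_code_inj_k {old : String} {k k' : Int} (h : pvCode old k = pvCode old k') : k = k' := by
  have := congrArg String.toList h
  rw [pv_code_toList, pv_code_toList] at this
  exact pv_toChars_inj (List.cons.injEq .. ▸ (List.append_cancel_left this) |>.2)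

lemma pv_rev_digit_split : ∀ (x y a b : List Char), (∀ c ∈ x, c.isDigit) → (∀ c ∈ y, c.isDigit) →
    x ++ '_' :: a = y ++ '_' :: b → x = y ∧ a = b := by
  intro x
  induction x with
  | nil =>
    intro y a b _ hy h
    cases y with
    | nil => simpa using h
    | cons c t =>
      exfalso
      have hc : '_' = c := by simpa using congrArg List.head? h
      have hd := hy c List.mem_cons_self
      rw [← hc] at hd
      exact absurd hd (by decide)
  | cons c t ih =>
    intro y a b hx hy h
    cases y with
    | nil =>
      exfalso
      have : c = '_' := by simpa using congrArg List.head? h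
      have hd := hx c List.mem_cons_self
      rw [this] at hd; simp [Char.isDigit] at hd
    | cons c' t' =>
      simp only [List.cons_append, List.cons.injEq] at h
      obtain ⟨rfl, h2⟩ := h
      obtain ⟨e1, e2⟩ := ih t' a b (fun d hd => hx d (List.mem_cons_of_mem _ hd))
        (fun d hd => hy d (List.mem_cons_of_mem _ hd)) h2
      exact ⟨by rw [e1], e2⟩

lemma pv_code_inj_old {o o' : String} {k k' : Int} (hk : 0 < k) (hk' : 0 < k')
    (h : pvCode o k = pvCode o' k') : o = o' := by
  have hl := congrArg String.toList h
  rw [pv_code_toList, pv_code_toList] at hl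
  have hrev := congrArg List.reverse hl
  simp only [List.reverse_append, List.reverse_cons] at hrev
  rw [List.append_assoc, List.append_assoc] at hrev
  simp only [List.singleton_append] at hrev
  have := pv_rev_digit_split _ _ _ _
    (fun c hc => pv_toChars_digits (by omega) c (List.mem_reverse.1 hc))
    (fun c hc => pv_toChars_digits (by omega) c (List.mem_reverse.1 hc)) hrev
  apply String.toList_inj.mp
  have := this.2
  simpa using congrArg List.reverse this

lemma pv_code_ne_numeric (old : String) (k m : Int) : pvCode old k ≠ PySem.Int.toStr m := by
  intro h
  have hl := congrArg String.toList h
  rw [pv_code_toList] at hl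
  have : '_' ∈ PySem.Int.toChars m := by
    rw [PySem.Int.toList_toStr] at hl
    exact hl ▸ List.mem_append.2 (Or.inr List.mem_cons_self)
  exact pv_underscore_not_mem_toChars m this

-- ---- the scan for the next free candidate: specification and bridge ----

def pvLeastNum (S : List String) (s c : Int) : Prop :=
  s ≤ c ∧ PySem.Int.toStr c ∉ S ∧ ∀ m : Int, s ≤ m → m < c → PySem.Int.toStr m ∈ S

def pvLeastCode (S : List String) (old : String) (s k : Int) : Prop :=
  s ≤ k ∧ pvCode old k ∉ S ∧ ∀ j : Int, s ≤ j → j < k → pvCode old j ∈ S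

lemma pv_scanId_eq (fuel : Nat) (u : PySem.Set String) :
    ∀ start, pvNextAvailable fuel start u = pvScanId fuel start u := by
  induction fuel with
  | zero => intro start; rfl
  | succ f ih =>
    intro start
    simp only [pvNextAvailable, pvScanId]
    split <;> simp [ih]

lemma pv_tagScan_eq (fuel : Nat) (old : String) (u : PySem.Set String) :
    ∀ k, pvTagScan fuel old k u = (pvCode old (pvScanCode fuel old k u), pvScanCode fuel old k u) := by
  induction fuel with
  | zero => intro k; rfl
  | succ f ih =>
    intro k
    simp only [pvTagScan, pvScanCode]
    split <;> simp [ih]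

lemma pv_scanId_spec (S : PySem.Set String) :
    ∀ (fuel : Nat) (start : Int), (∃ k : Nat, k < fuel ∧ PySem.Int.toStr (start + k) ∉ S) →
    pvLeastNum S start (pvScanId fuel start S) := by
  intro fuel
  induction fuel with
  | zero => rintro s ⟨k, hk, _⟩; omega
  | succ f ih =>
    rintro s h
    simp only [pvScanId]
    by_cases hc : S.contains (PySem.Int.toStr s) = true
    · rw [if_pos hc]
      have hs : PySem.Int.toStr s ∈ S := (PySem.Set.contains_iff S _).1 hc
      obtain ⟨k, hk, hfree⟩ := h
      have hk0 : k ≠ 0 := by rintro rfl; simp at hfree; exact hfree hs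
      have hrec := ih (s + 1) ⟨k - 1, by omega, by
        have : s + 1 + ((k - 1 : Nat) : Int) = s + (k : Int) := by omega
        rw [this]; exact hfree⟩
      obtain ⟨h1, h2, h3⟩ := hrec
      refine ⟨by omega, h2, fun m hm1 hm2 => ?_⟩
      by_cases hms : m = s
      · exact hms ▸ hs
      · exact h3 m (by omega) hm2
    · rw [if_neg hc]
      exact ⟨le_refl s, fun h' => hc ((PySem.Set.contains_iff S _).2 h'),
        fun m h1 h2 => absurd h1 (by omega)⟩

lemma pv_exists_free_num (S : List String) (s : Int) :
    ∃ k : Nat, k < S.length + 1 ∧ PySem.Int.toStr (s + k) ∉ S := by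
  by_contra hcon
  have hcon2 : ∀ k : Nat, k < S.length + 1 → PySem.Int.toStr (s + k) ∈ S := by
    intro k hk
    by_contra hfree
    exact hcon ⟨k, hk, hfree⟩
  set L := (List.range (S.length + 1)).map (fun k : Nat => PySem.Int.toStr (s + k)) with hL
  have hnd : L.Nodup := by
    refine List.Nodup.map_on ?_ (List.nodup_range)
    intro a ha b hb hab
    have := pv_toStr_inj hab; omega
  have hsub : L ⊆ S := by
    intro x hx
    rw [hL, List.mem_map] at hx
    obtain ⟨k, hk, rfl⟩ := hx
    exact hcon2 k (by simpa using hk)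
  have h1 : L.toFinset.card = L.length := List.toFinset_card_of_nodup hnd
  have h2 : L.toFinset ⊆ S.toFinset := by
    intro x hx; rw [List.mem_toFinset] at *; exact hsub hx
  have h3 := Finset.card_le_card h2
  have h4 := List.toFinset_card_le S
  have h5 : L.length = S.length + 1 := by simp [hL]
  omega

lemma pv_leastNum_unique {S : List String} {s c c' : Int}
    (h1 : pvLeastNum S s c) (h2 : pvLeastNum S s c') : c = c' := by
  obtain ⟨a1, b1, d1⟩ := h1
  obtain ⟨a2, b2, d2⟩ := h2
  by_contra hne
  rcases lt_or_gt_of_ne hne with h | h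
  · exact b1 (d2 c a1 h)
  · exact b2 (d1 c' a2 h)

-- every element of "extra" is str(m) with m below the scan start
def pvSmall (extra : List String) (s : Int) : Prop :=
  ∀ x ∈ extra, ∃ m : Int, m < s ∧ x = PySem.Int.toStr m

lemma pv_leastNum_union {S extra : List String} {s c : Int} (hex : pvSmall extra s) :
    pvLeastNum (PySem.Set.union S extra) s c ↔ pvLeastNum S s c := by
  constructor
  · rintro ⟨h1, h2, h3⟩
    refine ⟨h1, fun hm => h2 ((PySem.Set.mem_union S extra _).2 (Or.inl hm)), fun m hm1 hm2 => ?_⟩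
    rcases (PySem.Set.mem_union S extra _).1 (h3 m hm1 hm2) with h | h
    · exact h
    · obtain ⟨m', hm', he⟩ := hex _ h
      have := pv_toStr_inj he.symm
      omega
  · rintro ⟨h1, h2, h3⟩
    refine ⟨h1, fun hm => ?_, fun m hm1 hm2 =>
      (PySem.Set.mem_union S extra _).2 (Or.inl (h3 m hm1 hm2))⟩
    rcases (PySem.Set.mem_union S extra _).1 hm with h | h
    · exact h2 h
    · obtain ⟨m', hm', he⟩ := hex _ h
      have := pv_toStr_inj he.symm
      omega

lemma pv_scan_bridge_num (S extra : PySem.Set String) (s : Int) (hex : pvSmall extra s) :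
    pvNextAvailable ((PySem.Set.union S extra).length + 1) s (PySem.Set.union S extra)
      = pvScanId (S.length + 1) s S := by
  rw [pv_scanId_eq]
  have hA := pv_scanId_spec (PySem.Set.union S extra) _ s
    (pv_exists_free_num (PySem.Set.union S extra) s)
  have hB := pv_scanId_spec S _ s (pv_exists_free_num S s)
  exact pv_leastNum_unique ((pv_leastNum_union hex).1 hA) hB

-- ---- the analogous scan for tag codes ----

lemma pv_scanCode_spec (S : PySem.Set String) (old : String) :
    ∀ (fuel : Nat) (s : Int), (∃ k : Nat, k < fuel ∧ pvCode old (s + k) ∉ S) →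
    pvLeastCode S old s (pvScanCode fuel old s S) := by
  intro fuel
  induction fuel with
  | zero => rintro s ⟨k, hk, _⟩; omega
  | succ f ih =>
    rintro s h
    simp only [pvScanCode]
    by_cases hc : S.contains (pvCode old s) = true
    · rw [if_pos hc]
      have hs : pvCode old s ∈ S := (PySem.Set.contains_iff S _).1 hc
      obtain ⟨k, hk, hfree⟩ := h
      have hk0 : k ≠ 0 := by rintro rfl; simp at hfree; exact hfree hs
      have hrec := ih (s + 1) ⟨k - 1, by omega, by
        have : s + 1 + ((k - 1 : Nat) : Int) = s + (k : Int) := by omega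
        rw [this]; exact hfree⟩
      obtain ⟨h1, h2, h3⟩ := hrec
      refine ⟨by omega, h2, fun j hj1 hj2 => ?_⟩
      by_cases hjs : j = s
      · exact hjs ▸ hs
      · exact h3 j (by omega) hj2
    · rw [if_neg hc]
      exact ⟨le_refl s, fun h' => hc ((PySem.Set.contains_iff S _).2 h'),
        fun j h1 h2 => absurd h1 (by omega)⟩

lemma pv_exists_free_code (S : List String) (old : String) (s : Int) :
    ∃ k : Nat, k < S.length + 1 ∧ pvCode old (s + k) ∉ S := by
  by_contra hcon
  have hcon2 : ∀ k : Nat, k < S.length + 1 → pvCode old (s + k) ∈ S := by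
    intro k hk
    by_contra hfree
    exact hcon ⟨k, hk, hfree⟩
  set L := (List.range (S.length + 1)).map (fun k : Nat => pvCode old (s + k)) with hL
  have hnd : L.Nodup := by
    refine List.Nodup.map_on ?_ (List.nodup_range)
    intro a ha b hb hab
    have := pv_code_inj_k hab; omega
  have hsub : L ⊆ S := by
    intro x hx
    rw [hL, List.mem_map] at hx
    obtain ⟨k, hk, rfl⟩ := hx
    exact hcon2 k (by simpa using hk)
  have h1 : L.toFinset.card = L.length := List.toFinset_card_of_nodup hnd
  have h2 : L.toFinset ⊆ S.toFinset := by
    intro x hx; rw [List.mem_toFinset] at *; exact hsub hx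
  have h3 := Finset.card_le_card h2
  have h4 := List.toFinset_card_le S
  have h5 : L.length = S.length + 1 := by simp [hL]
  omega

lemma pv_leastCode_unique {S : List String} {old : String} {s k k' : Int}
    (h1 : pvLeastCode S old s k) (h2 : pvLeastCode S old s k') : k = k' := by
  obtain ⟨a1, b1, d1⟩ := h1
  obtain ⟨a2, b2, d2⟩ := h2
  by_contra hne
  rcases lt_or_gt_of_ne hne with h | h
  · exact b1 (d2 k a1 h)
  · exact b2 (d1 k' a2 h)

-- elements that can never equal a candidate code "old_k" with s ≤ k (and old outside forb)
def pvTagOk (forb : List String) (old : String) (s : Int) (x : String) : Prop :=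
  (∃ m : Int, x = PySem.Int.toStr m) ∨
  ∃ o k, 0 < k ∧ x = pvCode o k ∧ o ∉ forb ∧ (o ≠ old ∨ k < s)

lemma pv_tagOk_mono {forb old s s' x} (h : pvTagOk forb old s x) (hs : s ≤ s') :
    pvTagOk forb old s' x := by
  rcases h with h | ⟨o, k, h1, h2, h3, h4⟩
  · exact Or.inl h
  · exact Or.inr ⟨o, k, h1, h2, h3, by rcases h4 with h | h; exact Or.inl h; exact Or.inr (by omega)⟩

lemma pv_tagOk_ne {forb old s x} (h : pvTagOk forb old s x) (hs : 1 ≤ s)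
    {j : Int} (hj : s ≤ j) : x ≠ pvCode old j := by
  intro he
  rcases h with ⟨m, rfl⟩ | ⟨o, k, h1, rfl, h3, h4⟩
  · exact pv_code_ne_numeric old j m he.symm
  · rcases h4 with h | h
    · exact h (pv_code_inj_old h1 (by omega) he)
    · have ho : o = old := pv_code_inj_old h1 (by omega) he
      subst ho
      have := pv_code_inj_k he
      omega


-- ---- bridge for the tag-code scan ----

lemma pv_leastCode_union {S extra : List String} {forb : List String} {old : String} {s k : Int}
    (hs : 1 ≤ s) (hex : ∀ x ∈ extra, pvTagOk forb old s x) :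
    pvLeastCode (PySem.Set.union S extra) old s k ↔ pvLeastCode S old s k := by
  constructor
  · rintro ⟨h1, h2, h3⟩
    refine ⟨h1, fun hm => h2 ((PySem.Set.mem_union S extra _).2 (Or.inl hm)), fun j hj1 hj2 => ?_⟩
    rcases (PySem.Set.mem_union S extra _).1 (h3 j hj1 hj2) with h | h
    · exact h
    · exact absurd rfl (pv_tagOk_ne (hex _ h) hs hj1)
  · rintro ⟨h1, h2, h3⟩
    refine ⟨h1, fun hm => ?_, fun j hj1 hj2 =>
      (PySem.Set.mem_union S extra _).2 (Or.inl (h3 j hj1 hj2))⟩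
    rcases (PySem.Set.mem_union S extra _).1 hm with h | h
    · exact h2 h
    · exact absurd rfl (pv_tagOk_ne (hex _ h) hs h1)

lemma pv_scan_bridge_code (S extra : PySem.Set String) {forb : List String} (old : String)
    (s : Int) (hs : 1 ≤ s) (hex : ∀ x ∈ extra, pvTagOk forb old s x) :
    pvScanCode ((PySem.Set.union S extra).length + 1) old s (PySem.Set.union S extra)
      = pvScanCode (S.length + 1) old s S := by
  have hA := pv_scanCode_spec (PySem.Set.union S extra) old _ s
    (pv_exists_free_code (PySem.Set.union S extra) old s)
  have hB := pv_scanCode_spec S old _ s (pv_exists_free_code S old s)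
  exact pv_leastCode_unique ((pv_leastCode_union hs hex).1 hA) hB

-- ---- the batch of fresh IDs: length, splitting, final scan position ----

def pvFreshEnd (u : PySem.Set String) : Int → Nat → Int
  | s, 0 => s
  | s, n + 1 => pvFreshEnd u (pvScanId (u.length + 1) s u + 1) n

lemma pv_freshIds_len (u : PySem.Set String) : ∀ (s : Int) (n : Nat), (pvFreshIds u s n).length = n := by
  intro s n
  induction n generalizing s with
  | zero => rfl
  | succ n ih => simp [pvFreshIds, ih]

lemma pv_freshIds_add (u : PySem.Set String) :
    ∀ (a : Nat) (s : Int) (b : Nat),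
      pvFreshIds u s (a + b) = pvFreshIds u s a ++ pvFreshIds u (pvFreshEnd u s a) b := by
  intro a
  induction a with
  | zero => intro s b; simp [pvFreshIds, pvFreshEnd]
  | succ a ih =>
    intro s b
    have : a + 1 + b = (a + b) + 1 := by omega
    rw [this]
    simp only [pvFreshIds, pvFreshEnd]
    rw [ih]
    simp

-- ---- the numeric allocation loops agree ----

lemma pv_mem_add_elim {l : PySem.Set String} {y x : String} (h : x ∈ PySem.Set.add l y) :
    x ∈ l ∨ x = y := by
  have := (PySem.Set.mem_add l y x).1 h
  tauto

lemma pv_inner_num (au : List (String × List String)) (et old : String) (keeper : Int) :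
    ∀ (mods : List Int) (remap : PySem.Dict (Int × String × String) String)
      (newly : PySem.Dict String (PySem.Set String)) (start : Int),
      pvSmall (newly.getD et []) start →
      (mods.foldl (pvStepA au et old keeper) (remap, newly, start)).1 =
        (((mods.filter (fun m => !(m == keeper))).map (fun m => (m, old))).zip
          (pvFreshIds ((PySem.Dict.mk au).getD et []) start
            (mods.filter (fun m => !(m == keeper))).length)).foldl
          (fun r q => r.insert (q.1.1, et, q.1.2) (PySem.Int.toStr q.2)) remap
      ∧ (mods.foldl (pvStepA au et old keeper) (remap, newly, start)).2.2 =
          pvFreshEnd ((PySem.Dict.mk au).getD et []) start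
            (mods.filter (fun m => !(m == keeper))).length
      ∧ start ≤ (mods.foldl (pvStepA au et old keeper) (remap, newly, start)).2.2
      ∧ pvSmall ((mods.foldl (pvStepA au et old keeper) (remap, newly, start)).2.1.getD et [])
          (mods.foldl (pvStepA au et old keeper) (remap, newly, start)).2.2
      ∧ ∀ k, k ≠ et → (mods.foldl (pvStepA au et old keeper) (remap, newly, start)).2.1.getD k []
          = newly.getD k [] := by
  intro mods
  induction mods with
  | nil =>
    intro remap newly start hsm
    exact ⟨rfl, rfl, le_refl _, hsm, fun k _ => rfl⟩
  | cons m rest ih =>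
    intro remap newly start hsm
    by_cases hm : (m == keeper) = true
    · simp only [List.foldl_cons]
      rw [show pvStepA au et old keeper (remap, newly, start) m = (remap, newly, start) from by
        simp [pvStepA, hm]]
      rw [show (m :: rest).filter (fun m => !(m == keeper))
            = rest.filter (fun m => !(m == keeper)) from by simp [hm]]
      exact ih remap newly start hsm
    · have hstep : pvStepA au et old keeper (remap, newly, start) m =
        (remap.insert (m, et, old)
          (PySem.Int.toStr (pvScanId (((PySem.Dict.mk au).getD et []).length + 1) start
            ((PySem.Dict.mk au).getD et []))),
         newly.insert et ((newly.getD et []).add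
          (PySem.Int.toStr (pvScanId (((PySem.Dict.mk au).getD et []).length + 1) start
            ((PySem.Dict.mk au).getD et [])))),
         pvScanId (((PySem.Dict.mk au).getD et []).length + 1) start
            ((PySem.Dict.mk au).getD et []) + 1) := by
        simp only [pvStepA, if_neg hm]
        rw [pv_scan_bridge_num _ _ _ hsm]
      set S := (PySem.Dict.mk au).getD et [] with hS
      set idB := pvScanId (S.length + 1) start S with hid
      have hspec := pv_scanId_spec S (S.length + 1) start (pv_exists_free_num S start)
      rw [← hid] at hspec
      obtain ⟨hle, hfree, _⟩ := hspec
      have hsm' : pvSmall ((newly.insert et ((newly.getD et []).add (PySem.Int.toStr idB))).getD et [])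
          (idB + 1) := by
        rw [PySem.Dict.getD_insert]
        rw [if_pos rfl]
        intro x hx
        rcases pv_mem_add_elim hx with h | h
        · obtain ⟨m', hm', he⟩ := hsm x h
          exact ⟨m', by omega, he⟩
        · exact ⟨idB, by omega, h⟩
      have hrec := ih (remap.insert (m, et, old) (PySem.Int.toStr idB))
        (newly.insert et ((newly.getD et []).add (PySem.Int.toStr idB))) (idB + 1) hsm'
      simp only [List.foldl_cons, hstep]
      rw [show (m :: rest).filter (fun m => !(m == keeper))
            = m :: rest.filter (fun m => !(m == keeper)) from by simp [hm]]
      simp only [List.map_cons, List.length_cons]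
      have hfr : pvFreshIds S start ((rest.filter (fun m => !(m == keeper))).length + 1) =
          idB :: pvFreshIds S (idB + 1) (rest.filter (fun m => !(m == keeper))).length := by
        simp [pvFreshIds, ← hid]
      rw [hfr]
      simp only [List.zip_cons_cons, List.foldl_cons]
      have hend : pvFreshEnd S start ((rest.filter (fun m => !(m == keeper))).length + 1) =
          pvFreshEnd S (idB + 1) (rest.filter (fun m => !(m == keeper))).length := by
        simp [pvFreshEnd, ← hid]
      rw [hend]
      obtain ⟨c1, c2, c3, c4, c5⟩ := hrec
      refine ⟨c1, c2, by omega, c4, fun k hk => ?_⟩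
      rw [c5 k hk, PySem.Dict.getD_insert_of_ne _ _ _ hk]

lemma pv_conf_num (au : List (String × List String)) (et : String) :
    ∀ (idc : List (String × List Int)) (remap : PySem.Dict (Int × String × String) String)
      (newly : PySem.Dict String (PySem.Set String)) (start : Int),
      pvSmall (newly.getD et []) start →
      (idc.foldl (pvConfStepA au et) (remap, newly, start)).1 =
        ((pvSlots idc).zip (pvFreshIds ((PySem.Dict.mk au).getD et []) start
            (pvSlots idc).length)).foldl
          (fun r q => r.insert (q.1.1, et, q.1.2) (PySem.Int.toStr q.2)) remap
      ∧ pvSmall ((idc.foldl (pvConfStepA au et) (remap, newly, start)).2.1.getD et [])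
          (idc.foldl (pvConfStepA au et) (remap, newly, start)).2.2
      ∧ ∀ k, k ≠ et → (idc.foldl (pvConfStepA au et) (remap, newly, start)).2.1.getD k []
          = newly.getD k [] := by
  intro idc
  induction idc with
  | nil =>
    intro remap newly start hsm
    exact ⟨rfl, hsm, fun k _ => rfl⟩
  | cons p rest ih =>
    intro remap newly start hsm
    set S := (PySem.Dict.mk au).getD et [] with hS
    set keeper := (PySem.List.max? p.2 (fun x => x)).getD 0 with hkeep
    set mods := PySem.List.sorted p.2 (fun x => x) false with hmods
    set seg := (mods.filter (fun m => !(m == keeper))).map (fun m => (m, p.1)) with hseg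
    have hinner := pv_inner_num au et p.1 keeper mods remap newly start hsm
    obtain ⟨i1, i2, i3, i4, i5⟩ := hinner
    have hslots : pvSlots (p :: rest) = seg ++ pvSlots rest := by
      simp [pvSlots, hseg, hmods, hkeep]
    have hseglen : seg.length = (mods.filter (fun m => !(m == keeper))).length := by
      simp [hseg]
    simp only [List.foldl_cons, pvConfStepA, ← hkeep, ← hmods]
    set F := mods.foldl (pvStepA au et p.1 keeper) (remap, newly, start) with hF
    have hrec := ih F.1 F.2.1 F.2.2 i4
    rw [show (F.1, F.2.1, F.2.2) = F from rfl] at hrec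
    obtain ⟨r1, r2, r3⟩ := hrec
    refine ⟨?_, r2, fun k hk => by rw [r3 k hk, i5 k hk]⟩
    rw [r1, hslots]
    rw [List.length_append, hseglen, pv_freshIds_add, List.zip_append (by
      rw [pv_freshIds_len, hseglen])]
    rw [List.foldl_append, ← hseglen, i1, hseg, i2, hseglen]

def pvNumOnly (newly : PySem.Dict String (PySem.Set String)) : Prop :=
  ∀ k x, x ∈ newly.getD k [] → ∃ m : Int, x = PySem.Int.toStr m

lemma pv_outer_num (au : List (String × List String)) :
    ∀ (cs : List (String × List (String × List Int)))
      (remap : PySem.Dict (Int × String × String) String)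
      (newly : PySem.Dict String (PySem.Set String)),
      (cs.map Prod.fst).Nodup →
      (∀ e ∈ cs, newly.getD e.1 [] = []) →
      pvNumOnly newly →
      (cs.foldl (pvEntStepA au) (remap, newly)).1 = cs.foldl (pvEntB au) remap
      ∧ pvNumOnly (cs.foldl (pvEntStepA au) (remap, newly)).2 := by
  intro cs
  induction cs with
  | nil => intro remap newly _ _ hnum; exact ⟨rfl, hnum⟩
  | cons e rest ih =>
    intro remap newly hnd hemp hnum
    by_cases he : (e.1 == "tag_code") = true
    · simp only [List.foldl_cons, pvEntStepA, pvEntB, he]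
      exact ih remap newly (by simpa using hnd.of_cons) (fun e' h' => hemp e' (by simp [h']))
        hnum
    · have hsm0 : pvSmall (newly.getD e.1 []) (pvStartFor e.1) := by
        rw [hemp e (by simp)]; intro x hx; simp at hx
      have hconf := pv_conf_num au e.1 e.2 remap newly (pvStartFor e.1) hsm0
      obtain ⟨c1, c2, c3⟩ := hconf
      set F := e.2.foldl (pvConfStepA au e.1) (remap, newly, pvStartFor e.1) with hF
      have hstep : pvEntStepA au (remap, newly) e = (F.1, F.2.1) := by
        simp only [pvEntStepA, if_neg he, hF]
      have hstepB : pvEntB au remap e =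
          ((pvSlots e.2).zip (pvFreshIds ((PySem.Dict.mk au).getD e.1 []) (pvStartFor e.1)
            (pvSlots e.2).length)).foldl
            (fun r q => r.insert (q.1.1, e.1, q.1.2) (PySem.Int.toStr q.2)) remap := by
        simp only [pvEntB, if_neg he]
      have hne : ∀ e' ∈ rest, e'.1 ≠ e.1 := by
        intro e' h' heq
        simp only [List.map_cons, List.nodup_cons] at hnd
        exact hnd.1 (heq ▸ List.mem_map_of_mem h')
      have hrec := ih F.1 F.2.1 (by simpa using hnd.of_cons)
        (fun e' h' => by rw [c3 e'.1 (hne e' h'), hemp e' (by simp [h'])])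
        (by
          intro k x hx
          by_cases hk : k = e.1
          · subst hk
            obtain ⟨m', _, he'⟩ := c2 x hx
            exact ⟨m', he'⟩
          · rw [c3 k hk] at hx
            exact hnum k x hx)
      simp only [List.foldl_cons, hstep]
      refine ⟨?_, hrec.2⟩
      rw [hrec.1, hstepB, ← c1]

-- ---- the tag-code loops agree ----

lemma pv_inner_tag (au : List (String × List String)) (old : String) (keeper : Int) :
    ∀ (mods : List Int) (remap : PySem.Dict (Int × String × String) String)
      (newly : PySem.Dict String (PySem.Set String)) (s : Int) (forb : List String),
      1 ≤ s → old ∉ forb →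
      (∀ x ∈ newly.getD "tag" [], pvTagOk forb old s x) →
      (mods.foldl (pvTagStepA au old keeper) (remap, newly, s)).1 =
        ((mods.filter (fun m => !(m == keeper))).zip
          (pvFreshCodes ((PySem.Dict.mk au).getD "tag" []) old s
            (mods.filter (fun m => !(m == keeper))).length)).foldl
          (fun r q => r.insert (q.1, "tag_code", old) q.2) remap
      ∧ (∀ x ∈ (mods.foldl (pvTagStepA au old keeper) (remap, newly, s)).2.1.getD "tag" [],
          pvTagOk forb old (mods.foldl (pvTagStepA au old keeper) (remap, newly, s)).2.2 x)
      ∧ ∀ k, k ≠ "tag" → (mods.foldl (pvTagStepA au old keeper) (remap, newly, s)).2.1.getD k []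
          = newly.getD k [] := by
  intro mods
  induction mods with
  | nil =>
    intro remap newly s forb _ _ htag
    exact ⟨rfl, htag, fun k _ => rfl⟩
  | cons m rest ih =>
    intro remap newly s forb hs hold htag
    by_cases hm : (m == keeper) = true
    · simp only [List.foldl_cons]
      rw [show pvTagStepA au old keeper (remap, newly, s) m = (remap, newly, s) from by
        simp [pvTagStepA, hm]]
      rw [show (m :: rest).filter (fun m => !(m == keeper))
            = rest.filter (fun m => !(m == keeper)) from by simp [hm]]
      exact ih remap newly s forb hs hold htag
    · set S := (PySem.Dict.mk au).getD "tag" [] with hS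
      set kB := pvScanCode (S.length + 1) old s S with hkB
      have hspec := pv_scanCode_spec S old (S.length + 1) s (pv_exists_free_code S old s)
      rw [← hkB] at hspec
      obtain ⟨hle, hfree, _⟩ := hspec
      have hstep : pvTagStepA au old keeper (remap, newly, s) m =
          (remap.insert (m, "tag_code", old) (pvCode old kB),
           newly.insert "tag" ((newly.getD "tag" []).add (pvCode old kB)),
           kB + 1) := by
        simp only [pvTagStepA, if_neg hm]
        rw [pv_tagScan_eq]
        rw [pv_scan_bridge_code S _ old s hs htag]
      have htag' : ∀ x ∈ (newly.insert "tag" ((newly.getD "tag" []).add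
          (pvCode old kB))).getD "tag" [], pvTagOk forb old (kB + 1) x := by
        rw [PySem.Dict.getD_insert, if_pos rfl]
        intro x hx
        rcases pv_mem_add_elim hx with h | h
        · exact pv_tagOk_mono (htag x h) (by omega)
        · exact Or.inr ⟨old, kB, by omega, h, hold, Or.inr (by omega)⟩
      have hrec := ih (remap.insert (m, "tag_code", old) (pvCode old kB))
        (newly.insert "tag" ((newly.getD "tag" []).add (pvCode old kB))) (kB + 1) forb
        (by omega) hold htag'
      simp only [List.foldl_cons, hstep]
      rw [show (m :: rest).filter (fun m => !(m == keeper))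
            = m :: rest.filter (fun m => !(m == keeper)) from by simp [hm]]
      simp only [List.length_cons]
      have hfr : pvFreshCodes S old s ((rest.filter (fun m => !(m == keeper))).length + 1) =
          pvCode old kB :: pvFreshCodes S old (kB + 1)
            (rest.filter (fun m => !(m == keeper))).length := by
        simp [pvFreshCodes, ← hkB]
      rw [hfr]
      simp only [List.zip_cons_cons, List.foldl_cons]
      obtain ⟨c1, c2, c3⟩ := hrec
      refine ⟨c1, c2, fun k hk => ?_⟩
      rw [c3 k hk, PySem.Dict.getD_insert_of_ne _ _ _ hk]

lemma pv_outer_tag (au : List (String × List String)) :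
    ∀ (idc : List (String × List Int)) (remap : PySem.Dict (Int × String × String) String)
      (newly : PySem.Dict String (PySem.Set String)),
      (idc.map Prod.fst).Nodup →
      (∀ x ∈ newly.getD "tag" [], (∃ m : Int, x = PySem.Int.toStr m) ∨
        ∃ o k, 0 < k ∧ x = pvCode o k ∧ o ∉ idc.map Prod.fst) →
      (idc.foldl (pvTagConfStepA au) (remap, newly)).1 = idc.foldl (pvTagB au) remap := by
  intro idc
  induction idc with
  | nil => intro remap newly _ _; rfl
  | cons p rest ih =>
    intro remap newly hnd htag
    have hold : p.1 ∉ rest.map Prod.fst := by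
      simp only [List.map_cons, List.nodup_cons] at hnd
      exact hnd.1
    have htag0 : ∀ x ∈ newly.getD "tag" [], pvTagOk (rest.map Prod.fst) p.1 1 x := by
      intro x hx
      rcases htag x hx with h | ⟨o, k, h1, h2, h3⟩
      · exact Or.inl h
      · refine Or.inr ⟨o, k, h1, h2, fun hmem => h3 (by simp [hmem]), Or.inl fun heq => ?_⟩
        exact h3 (by simp [heq])
    set keeper := (PySem.List.max? p.2 (fun x => x)).getD 0 with hkeep
    set mods := PySem.List.sorted p.2 (fun x => x) false with hmods
    have hinner := pv_inner_tag au p.1 keeper mods remap newly 1 (rest.map Prod.fst)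
      (le_refl 1) hold htag0
    obtain ⟨i1, i2, i3⟩ := hinner
    simp only [List.foldl_cons, pvTagConfStepA, ← hkeep, ← hmods]
    set F := mods.foldl (pvTagStepA au p.1 keeper) (remap, newly, 1) with hF
    have hB : pvTagB au remap p =
        ((mods.filter (fun m => !(m == keeper))).zip
          (pvFreshCodes ((PySem.Dict.mk au).getD "tag" []) p.1 1
            (mods.filter (fun m => !(m == keeper))).length)).foldl
          (fun r q => r.insert (q.1, "tag_code", p.1) q.2) remap := by
      simp only [pvTagB, ← hkeep, ← hmods]
    have hrec := ih F.1 F.2.1 (by simpa using hnd.of_cons) (by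
      intro x hx
      rcases i2 x hx with h | ⟨o, k, h1, h2, h3, _⟩
      · exact Or.inl h
      · exact Or.inr ⟨o, k, h1, h2, h3⟩)
    rw [show (F.1, F.2.1) = (F.1, F.2.1) from rfl]
    rw [hrec, i1, hB]

-- ---- initial states and dict-literal facts ----

lemma pv_newly0_getD (au : List (String × List String)) :
    ∀ k, (PySem.Dict.mk (au.map (fun kv => (kv.1, ([] : PySem.Set String))))).getD k [] = [] := by
  intro k
  induction au with
  | nil => rfl
  | cons kv rest ih =>
    simp only [List.map_cons, PySem.Dict.getD, PySem.Dict.get?_mk_cons]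
    split
    · rfl
    · exact ih

lemma pv_get?_mem {T : Type} : ∀ (l : List (String × T)) (k : String) (v : T),
    (PySem.Dict.mk l).get? k = some v → (k, v) ∈ l := by
  intro l
  induction l with
  | nil => intro k v h; simp [PySem.Dict.get?] at h
  | cons p rest ih =>
    intro k v h
    rw [PySem.Dict.get?_mk_cons] at h
    split at h
    · rename_i hk
      have hpk : p.1 = k := by simpa using hk
      have hv : p.2 = v := by simpa using h
      exact List.mem_cons.2 (Or.inl (Prod.ext hpk hv).symm)
    · right
      exact ih k v h

-- ===== VERDICT =====
theorem allocate_new_ids_spec : Claim_equal_allocate_new_ids := by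
  intro conflicts all_used mod_count hDom hPre
  obtain ⟨h1, h2, h3, h4⟩ := hPre
  unfold Spec_allocate_new_ids allocate_new_ids allocate_new_ids_alt
  set newly0 : PySem.Dict String (PySem.Set String) :=
    PySem.Dict.mk (all_used.map (fun kv => (kv.1, ([] : PySem.Set String)))) with hn0
  have hmain := pv_outer_num all_used conflicts PySem.Dict.empty newly0 h1
    (fun e _ => pv_newly0_getD all_used e.1)
    (fun k x hx => by rw [pv_newly0_getD all_used k] at hx; exact absurd hx (List.not_mem_nil))
  set st1 := conflicts.foldl (pvEntStepA all_used) (PySem.Dict.empty, newly0) with hst1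
  cases hcase : (PySem.Dict.mk conflicts).get? "tag_code" with
  | none =>
    simp only [hcase]
    rw [hmain.1]
  | some idc =>
    simp only [hcase]
    have hmem := pv_get?_mem conflicts "tag_code" idc hcase
    have hnd : (idc.map Prod.fst).Nodup := (h2 _ hmem).1
    have htag : ∀ x ∈ st1.2.getD "tag" [], (∃ m : Int, x = PySem.Int.toStr m) ∨
        ∃ o k, 0 < k ∧ x = pvCode o k ∧ o ∉ idc.map Prod.fst := by
      intro x hx
      exact Or.inl (hmain.2 "tag" x hx)
    have := pv_outer_tag all_used idc st1.1 st1.2 hnd htag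
    rw [show (st1.1, st1.2) = st1 from rfl] at this
    rw [this, hmain.1]
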